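-- pv_equiv track=rewrite | github.com/vrylskyj/dz2-RylskyjVictor | kasiski.py | find_key_lengths
-- ===== SOURCE A (Python) =====
-- from collections import defaultdict
--
-- def find_key_lengths(sequences):
--     distances = []
--     for positions in sequences.values():
--         for i in range(len(positions) - 1):
--             distances.append(positions[i + 1][1] - positions[i][1])
--
--     # Знаходимо всі дільники відстаней для визначення кратної довжини ключа
--     possible_lengths = defaultdict(int)
--     for distance in distances:
--         for i in range(2, distance + 1):
--             if distance % i == 0:
--                 possible_lengths[i] += 1
--
--     return sorted(possible_lengths.items(), key=lambda x: -x[1])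
-- ===== SOURCE B (Python) =====
-- def find_key_lengths(sequences):
--     counts = {}
--     for positions in sequences.values():
--         if not positions:
--             continue
--         it = iter(positions)
--         prev = next(it)[1]
--         for _, cur in it:
--             d = cur - prev
--             prev = cur
--             if d < 2:
--                 continue
--             small, large = [], []
--             i = 1
--             while i * i <= d:
--                 if d % i == 0:
--                     small.append(i)
--                     if i * i != d:
--                         large.append(d // i)
--                 i += 1
--             for v in small[1:] + list(reversed(large)):
--                 counts[v] = counts.get(v, 0) + 1
--     return sorted(counts.items(), key=lambda x: -x[1])
-- ===== Notes on version B (the rewrite author's own statement) =====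
-- stated objective: faster
-- what changed: B enumerates each distance's divisors by trial division up to sqrt(distance) (small divisors merged with the reversed large cofactors, preserving A's ascending first-seen order) instead of A's scan of every integer from 2 to the distance, and counts in a single streaming pass with no intermediate distances list, skipping distances < 2 which have no divisors > 1; intended as faster — the probe's small-distance inputs measured B at only 1.37-1.52x A, below the 1.5x confirmation bar.
import Mathlib
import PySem

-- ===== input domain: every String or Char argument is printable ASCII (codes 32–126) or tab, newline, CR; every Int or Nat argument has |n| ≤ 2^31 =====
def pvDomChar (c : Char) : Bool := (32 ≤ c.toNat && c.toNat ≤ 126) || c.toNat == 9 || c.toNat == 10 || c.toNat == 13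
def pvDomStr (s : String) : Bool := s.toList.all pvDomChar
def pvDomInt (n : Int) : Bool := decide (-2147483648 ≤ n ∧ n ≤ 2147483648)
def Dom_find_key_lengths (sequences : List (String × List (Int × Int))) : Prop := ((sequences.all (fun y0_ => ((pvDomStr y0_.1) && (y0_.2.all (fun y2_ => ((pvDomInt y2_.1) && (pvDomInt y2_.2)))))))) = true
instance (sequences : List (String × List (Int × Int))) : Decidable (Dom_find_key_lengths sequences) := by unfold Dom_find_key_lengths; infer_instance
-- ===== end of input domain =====

-- B replaces A's O(distance) divisor scan by trial division up to sqrt(distance)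
-- (small/large divisor pairs, merged in ascending order) and counts pair
-- distances in one pass without building the intermediate distances list.

-- ===== PORT A =====
def find_key_lengths (sequences : List (String × List (Int × Int))) : List (Int × Int) :=
  -- distances: for positions in sequences.values(): for i in range(len(positions)-1): append(...)
  let distances : List Int :=
    (PySem.Dict.values ⟨sequences⟩).foldl
      (fun acc positions =>
        (PySem.List.pyRange 0 ((positions.length : Int) - 1) 1).foldl
          (fun acc2 i =>
            acc2 ++ [(PySem.List.pyGetD positions (i + 1) (0, 0)).2
                      - (PySem.List.pyGetD positions i (0, 0)).2]) acc)
      []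
  -- possible_lengths = defaultdict(int); nested divisor-counting loop
  let possible : PySem.Dict Int Int :=
    distances.foldl
      (fun dd distance =>
        (PySem.List.pyRange 2 (distance + 1) 1).foldl
          (fun dd2 i =>
            if PySem.Int.mod distance i = 0 then dd2.modify i 0 (· + 1) else dd2)
          dd)
      PySem.Dict.empty
  PySem.List.sorted possible.items (fun x => -x.2)

-- ===== PORT B =====
-- while i*i <= d: if d % i == 0: small.append(i); if i*i != d: large.append(d // i); i += 1
def pvDivAux (d i : Int) (small large : List Int) : List Int × List Int :=
  if i * i ≤ d then
    if PySem.Int.mod d i = 0 then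
      pvDivAux d (i + 1) (small ++ [i])
        (if i * i ≠ d then large ++ [PySem.Int.floordiv d i] else large)
    else
      pvDivAux d (i + 1) small large
  else (small, large)
termination_by (d + 1 - i).toNat
decreasing_by
  all_goals
    rename_i h _
    have hid : i ≤ d := by nlinarith [sq_nonneg (i - 1), sq_nonneg i]
    omega

-- small[1:] + list(reversed(large))
def pvDivisors (d : Int) : List Int :=
  let sl := pvDivAux d 1 [] []
  sl.1.drop 1 ++ sl.2.reverse

def find_key_lengths_alt (sequences : List (String × List (Int × Int))) : List (Int × Int) :=
  let counts : PySem.Dict Int Int :=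
    (PySem.Dict.values ⟨sequences⟩).foldl
      (fun dd positions =>
        match positions with
        | [] => dd                                   -- `if not positions: continue`
        | p0 :: rest =>                              -- prev = next(it)[1]; for pos in it: ...
          (rest.foldl
            (fun (st : Int × PySem.Dict Int Int) pos =>
              let cur := pos.2
              let d := cur - st.1
              if d < 2 then (cur, st.2)
              else
                (cur,
                  (pvDivisors d).foldl
                    (fun dd3 v => dd3.insert v (dd3.getD v 0 + 1)) st.2))
            (p0.2, dd)).2)
      PySem.Dict.empty
  PySem.List.sorted counts.items (fun x => -x.2)

-- ===== PRECONDITION & SPEC =====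
def Spec_find_key_lengths (sequences : List (String × List (Int × Int))) (out : List (Int × Int)) : Prop := out = find_key_lengths_alt sequences
instance (sequences : List (String × List (Int × Int))) (out : List (Int × Int)) : Decidable (Spec_find_key_lengths sequences out) := by unfold Spec_find_key_lengths; infer_instance

-- ===== CLAIM (what is proved, stated in full; the proofs are below) =====
def Claim_equal_find_key_lengths : Prop := ∀ (sequences : List (String × List (Int × Int))), Dom_find_key_lengths sequences → Spec_find_key_lengths sequences (find_key_lengths sequences)

-- ===== LEMMAS AND PROOFS =====

lemma pvDivAux_spec : ∀ (n : Nat) (d i : Int), (d + 1 - i).toNat ≤ n → 1 ≤ i →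
    ∃ T U : List Int,
      (∀ small large, pvDivAux d i small large = (small ++ T, large ++ U)) ∧
      (∀ x, x ∈ T ↔ i ≤ x ∧ x * x ≤ d ∧ x ∣ d) ∧
      (∀ y, y ∈ U ↔ ∃ x, i ≤ x ∧ x ∣ d ∧ x * x < d ∧ y = d / x) ∧
      T.Pairwise (· < ·) ∧ U.Pairwise (· > ·) := by
  intro n
  induction n with
  | zero =>
    intro d i hn hi
    have hdi : d < i := by omega
    have hlt : ¬ i * i ≤ d := by intro a; nlinarith
    refine ⟨[], [], ?_, ?_, ?_, List.Pairwise.nil, List.Pairwise.nil⟩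
    · intro s l; rw [pvDivAux]; simp [hlt]
    · intro x
      simp only [List.not_mem_nil, false_iff]
      rintro ⟨h1, h2, -⟩
      have : i * i ≤ x * x := by nlinarith
      omega
    · intro y
      simp only [List.not_mem_nil, false_iff]
      rintro ⟨x, h1, -, h3, -⟩
      have : i * i ≤ x * x := by nlinarith
      omega
  | succ n IH =>
    intro d i hn hi
    by_cases hlt : i * i ≤ d
    · have hid : i ≤ d := by nlinarith [sq_nonneg (i - 1)]
      have hdpos : 0 < d := by nlinarith
      obtain ⟨T', U', hrec, hTm, hUm, hTp, hUp⟩ :=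
        IH d (i + 1) (by omega) (by omega)
      by_cases hmod : PySem.Int.mod d i = 0
      · have hdvd : i ∣ d := (PySem.Int.mod_eq_zero_iff_dvd d i).mp hmod
        have hTmem : ∀ x, x ∈ i :: T' ↔ i ≤ x ∧ x * x ≤ d ∧ x ∣ d := by
          intro x
          simp only [List.mem_cons, hTm]
          constructor
          · rintro (rfl | ⟨h1, h2, h3⟩)
            · exact ⟨le_rfl, hlt, hdvd⟩
            · exact ⟨by omega, h2, h3⟩
          · rintro ⟨h1, h2, h3⟩
            rcases eq_or_lt_of_le h1 with h | h
            · exact Or.inl h.symm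
            · exact Or.inr ⟨by omega, h2, h3⟩
        have hTpw : (i :: T').Pairwise (· < ·) := by
          refine List.pairwise_cons.mpr ⟨?_, hTp⟩
          intro x hx; have := (hTm x).mp hx; omega
        by_cases hsq : i * i = d
        · refine ⟨i :: T', U', ?_, hTmem, ?_, hTpw, hUp⟩
          · intro s l
            rw [pvDivAux]
            simp only [if_pos, hmod, if_pos, hsq, ne_eq, not_true_eq_false, if_false]
            rw [hrec]
            simp
          · intro y
            rw [hUm]
            constructor
            · rintro ⟨x, h1, h2, h3, h4⟩; exact ⟨x, by omega, h2, h3, h4⟩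
            · rintro ⟨x, h1, h2, h3, h4⟩
              refine ⟨x, ?_, h2, h3, h4⟩
              rcases eq_or_lt_of_le h1 with h | h
              · subst h; omega
              · omega
        · -- i*i < d: large gains d // i
          have hsqlt : i * i < d := lt_of_le_of_ne hlt hsq
          have hfd : PySem.Int.floordiv d i = d / i :=
            PySem.Int.floordiv_eq_ediv_of_pos (by omega)
          refine ⟨i :: T', d / i :: U', ?_, hTmem, ?_, hTpw, ?_⟩
          · intro s l
            rw [pvDivAux]
            simp only [hlt, if_pos, hmod, ne_eq, hsq, not_false_eq_true, hfd]
            rw [hrec]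
            simp
          · intro y
            simp only [List.mem_cons, hUm]
            constructor
            · rintro (rfl | ⟨x, h1, h2, h3, h4⟩)
              · exact ⟨i, le_refl i, hdvd, hsqlt, rfl⟩
              · exact ⟨x, by omega, h2, h3, h4⟩
            · rintro ⟨x, h1, h2, h3, h4⟩
              rcases eq_or_lt_of_le h1 with h | h
              · exact Or.inl (by rw [h4, ← h])
              · exact Or.inr ⟨x, by omega, h2, h3, h4⟩
          · refine List.pairwise_cons.mpr ⟨?_, hUp⟩
            intro y hy
            obtain ⟨x, h1, h2, h3, rfl⟩ := (hUm y).mp hy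
            obtain ⟨c, hc⟩ := h2
            obtain ⟨c', hc'⟩ := hdvd
            have hxpos : 0 < x := by omega
            have hcpos : 0 < c := by nlinarith
            have hc'pos : 0 < c' := by nlinarith
            have hdx : d / x = c := by rw [hc]; exact Int.mul_ediv_cancel_left c (by omega)
            have hdi : d / i = c' := by rw [hc']; exact Int.mul_ediv_cancel_left c' (by omega)
            rw [hdx, hdi]
            -- d = x*c = i*c', x > i, c > 0 ⇒ c' > c
            nlinarith
      · -- i does not divide d
        have hndvd : ¬ i ∣ d := fun h => hmod ((PySem.Int.mod_eq_zero_iff_dvd d i).mpr h)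
        refine ⟨T', U', ?_, ?_, ?_, hTp, hUp⟩
        · intro s l
          rw [pvDivAux]
          simp only [hlt, if_pos, hmod, if_false]
          exact hrec s l
        · intro x
          rw [hTm]
          constructor
          · rintro ⟨h1, h2, h3⟩; exact ⟨by omega, h2, h3⟩
          · rintro ⟨h1, h2, h3⟩
            rcases eq_or_lt_of_le h1 with h | h
            · subst h; exact absurd h3 hndvd
            · exact ⟨by omega, h2, h3⟩
        · intro y
          rw [hUm]
          constructor
          · rintro ⟨x, h1, h2, h3, h4⟩; exact ⟨x, by omega, h2, h3, h4⟩
          · rintro ⟨x, h1, h2, h3, h4⟩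
            rcases eq_or_lt_of_le h1 with h | h
            · subst h; exact absurd h2 hndvd
            · exact ⟨x, by omega, h2, h3, h4⟩
    · refine ⟨[], [], ?_, ?_, ?_, List.Pairwise.nil, List.Pairwise.nil⟩
      · intro s l; rw [pvDivAux]; simp [hlt]
      · intro x
        simp only [List.not_mem_nil, false_iff]
        rintro ⟨h1, h2, -⟩
        have : i * i ≤ x * x := by nlinarith
        omega
      · intro y
        simp only [List.not_mem_nil, false_iff]
        rintro ⟨x, h1, -, h3, -⟩
        have : i * i ≤ x * x := by nlinarith
        omega

lemma pairwise_lt_eq {l₁ l₂ : List Int} (h₁ : l₁.Pairwise (· < ·))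
    (h₂ : l₂.Pairwise (· < ·)) (hm : ∀ x, x ∈ l₁ ↔ x ∈ l₂) : l₁ = l₂ := by
  have hp : l₁.Perm l₂ :=
    (List.perm_ext_iff_of_nodup (h₁.imp ne_of_lt) (h₂.imp ne_of_lt)).mpr hm
  exact List.Perm.eq_of_pairwise
    (fun a b _ _ hab hba => absurd hba (not_lt.mpr hab.le)) h₁ h₂ hp

lemma pvDivisors_eq (d : Int) :
    pvDivisors d
      = (PySem.List.pyRange 2 (d + 1) 1).filter (fun i => decide (PySem.Int.mod d i = 0)) := by
  obtain ⟨T, U, hrec, hTm, hUm, hTp, hUp⟩ :=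
    pvDivAux_spec (d + 1 - 1).toNat d 1 le_rfl le_rfl
  unfold pvDivisors
  rw [hrec [] []]
  simp only [List.nil_append]
  by_cases hd : 1 ≤ d
  · -- T starts with 1
    have h1T : (1 : Int) ∈ T := (hTm 1).mpr ⟨le_rfl, by omega, one_dvd d⟩
    obtain ⟨t, ts, rfl⟩ : ∃ t ts, T = t :: ts := by
      cases T with
      | nil => simp at h1T
      | cons t ts => exact ⟨t, ts, rfl⟩
    have ht1 : t = 1 := by
      rcases List.mem_cons.mp h1T with h | h
      · exact h.symm
      · have := (List.pairwise_cons.mp hTp).1 1 h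
        have := ((hTm t).mp List.mem_cons_self).1
        omega
    subst ht1
    have hts : ∀ x, x ∈ ts ↔ x ∈ (1 : Int) :: ts ∧ 1 < x := by
      intro x
      constructor
      · intro hx
        exact ⟨List.mem_cons_of_mem _ hx, (List.pairwise_cons.mp hTp).1 x hx⟩
      · rintro ⟨hx, h1x⟩
        rcases List.mem_cons.mp hx with h | h
        · omega
        · exact h
    have hVm : ∀ x, x ∈ ts ++ U.reverse ↔ 2 ≤ x ∧ x < d + 1 ∧ x ∣ d := by
      intro x
      rw [List.mem_append, List.mem_reverse, hts x, hUm x]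
      constructor
      · rintro (⟨hxT, hx1⟩ | ⟨z, hz1, hz2, hz3, rfl⟩)
        · obtain ⟨-, h2, h3⟩ := (hTm x).mp hxT
          have : x ≤ x * x := by nlinarith
          exact ⟨by omega, by omega, h3⟩
        · obtain ⟨c, hc⟩ := hz2
          have hcd : d / z = c := by rw [hc]; exact Int.mul_ediv_cancel_left _ (by omega)
          rw [hcd]
          have hdpos : 0 < d := by nlinarith
          have hcpos : 0 < c := by nlinarith
          have hzc : z < c := by nlinarith
          have hcled : c ≤ d := by nlinarith
          exact ⟨by omega, by omega, ⟨z, by rw [hc]; ring⟩⟩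
      · rintro ⟨h1, h2, h3⟩
        by_cases hsq : x * x ≤ d
        · exact Or.inl ⟨(hTm x).mpr ⟨by omega, hsq, h3⟩, by omega⟩
        · right
          obtain ⟨c, hc⟩ := h3
          have hxpos : 0 < x := by omega
          have hdpos : 0 < d := by omega
          have hcpos : 0 < c := by nlinarith
          have hcx : c < x := by nlinarith
          refine ⟨c, by omega, ⟨x, by rw [hc]; ring⟩, by nlinarith, ?_⟩
          have : d / c = x := by rw [hc, mul_comm]; exact Int.mul_ediv_cancel_left _ (by omega)
          omega
    have hVpw : (ts ++ U.reverse).Pairwise (· < ·) := by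
      rw [List.pairwise_append]
      refine ⟨(List.pairwise_cons.mp hTp).2, List.pairwise_reverse.mpr hUp, ?_⟩
      intro a ha b hb
      obtain ⟨haT, ha1⟩ := (hts a).mp ha
      obtain ⟨-, ha2, -⟩ := (hTm a).mp haT
      obtain ⟨z, hz1, hz2, hz3, rfl⟩ := (hUm b).mp (List.mem_reverse.mp hb)
      obtain ⟨c, hc⟩ := hz2
      have hcd : d / z = c := by rw [hc]; exact Int.mul_ediv_cancel_left _ (by omega)
      rw [hcd]
      have hcpos : 0 < c := by nlinarith
      have hzc : z < c := by nlinarith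
      -- a*a ≤ d = z*c < c*c ⇒ a < c
      nlinarith
    simp only [List.drop_succ_cons, List.drop_zero]
    refine pairwise_lt_eq hVpw (List.Pairwise.filter _ (PySem.List.pairwise_lt_pyRange_one 2 (d + 1))) ?_
    intro x
    rw [hVm x, List.mem_filter, PySem.List.mem_pyRange_one, decide_eq_true_eq,
      PySem.Int.mod_eq_zero_iff_dvd]
    tauto
  · -- d ≤ 0 (or d = 0): everything empty
    have hT : T = [] := by
      rw [List.eq_nil_iff_forall_not_mem]
      intro x hx
      obtain ⟨h1, h2, -⟩ := (hTm x).mp hx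
      nlinarith
    have hU : U = [] := by
      rw [List.eq_nil_iff_forall_not_mem]
      intro y hy
      obtain ⟨z, h1, -, h3, -⟩ := (hUm y).mp hy
      nlinarith
    rw [hT, hU, PySem.List.pyRange_one_eq_nil (by omega)]
    simp

lemma dl_eq (ps : List (Int × Int)) (acc : List Int) :
    (PySem.List.pyRange 0 ((ps.length : Int) - 1) 1).foldl
      (fun acc2 i =>
        acc2 ++ [(PySem.List.pyGetD ps (i + 1) (0, 0)).2
                  - (PySem.List.pyGetD ps i (0, 0)).2]) acc
    = acc ++ (ps.zip (ps.drop 1)).map (fun pq => pq.2.2 - pq.1.2) := by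
  rw [PySem.List.foldl_append_singleton_eq_map]
  congr 1
  apply List.ext_getElem
  · simp only [List.length_map, PySem.List.length_pyRange_one, List.length_zip,
      List.length_drop]
    omega
  · intro k h1 h2
    simp only [List.getElem_map, PySem.List.getElem_pyRange_one, List.getElem_zip,
      List.getElem_drop]
    have hk : k < ps.length - 1 := by
      simp only [List.length_map, PySem.List.length_pyRange_one] at h1
      omega
    have e1 : (0 : Int) + ↑k + 1 = ((k + 1 : Nat) : Int) := by push_cast; ring
    have e2 : (0 : Int) + ↑k = ((k : Nat) : Int) := by ring
    rw [e1, e2, PySem.List.pyGetD_natCast, PySem.List.pyGetD_natCast,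
      List.getD_eq_getElem ps _ (by omega), List.getD_eq_getElem ps _ (by omega)]
    simp [Nat.add_comm]

lemma divisor_fold_eq (dd : PySem.Dict Int Int) (dist : Int) :
    (PySem.List.pyRange 2 (dist + 1) 1).foldl
      (fun dd2 i => if PySem.Int.mod dist i = 0 then dd2.modify i 0 (· + 1) else dd2) dd
    = (pvDivisors dist).foldl (fun dd3 v => dd3.insert v (dd3.getD v 0 + 1)) dd := by
  rw [pvDivisors_eq, List.foldl_filter]
  simp only [decide_eq_true_eq, PySem.Dict.modify]

-- proof-only helper: the list of consecutive differences of the second components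
def pvDiffs (prev : Int) (rest : List (Int × Int)) : List Int :=
  match rest with
  | [] => []
  | q :: t => (q.2 - prev) :: pvDiffs q.2 t

lemma dl_cons_eq : ∀ (rest : List (Int × Int)) (p0 : Int × Int),
    ((p0 :: rest).zip rest).map (fun pq => pq.2.2 - pq.1.2) = pvDiffs p0.2 rest := by
  intro rest
  induction rest with
  | nil => intro p0; rfl
  | cons q t ih =>
    intro p0
    simp only [List.zip_cons_cons, List.map_cons, pvDiffs, ih q]

lemma pvDivisors_lt_two {d : Int} (h : d < 2) : pvDivisors d = [] := by
  rw [pvDivisors_eq, PySem.List.pyRange_one_eq_nil (by omega)]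
  rfl

lemma pairfold_eq : ∀ (rest : List (Int × Int)) (prev : Int) (dd : PySem.Dict Int Int),
    (rest.foldl
      (fun (st : Int × PySem.Dict Int Int) pos =>
        let cur := pos.2
        let d := cur - st.1
        if d < 2 then (cur, st.2)
        else
          (cur,
            (pvDivisors d).foldl
              (fun dd3 v => dd3.insert v (dd3.getD v 0 + 1)) st.2))
      (prev, dd)).2
    = (pvDiffs prev rest).foldl
        (fun dd dist =>
          (pvDivisors dist).foldl (fun dd3 v => dd3.insert v (dd3.getD v 0 + 1)) dd) dd := by
  intro rest
  induction rest with
  | nil => intro prev dd; rfl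
  | cons q t ih =>
    intro prev dd
    simp only [List.foldl_cons, pvDiffs]
    by_cases h : q.2 - prev < 2
    · rw [if_pos h, ih, pvDivisors_lt_two h]
      rfl
    · rw [if_neg h, ih]

lemma find_key_lengths_eq (s : List (String × List (Int × Int))) :
    find_key_lengths s = find_key_lengths_alt s := by
  unfold find_key_lengths find_key_lengths_alt
  dsimp only
  rw [PySem.List.foldl_congr_mem _ _
      (fun acc ps => acc ++ (ps.zip (ps.drop 1)).map (fun pq => pq.2.2 - pq.1.2)) _
      (fun acc ps _ => dl_eq ps acc),
    PySem.List.foldl_append_eq_flatMap, List.nil_append, List.flatMap_def,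
    List.foldl_flatten, List.foldl_map]
  congr 2
  apply PySem.List.foldl_congr_mem
  intro dd ps _
  rw [PySem.List.foldl_congr_mem _ _
      (fun dd2 dist =>
        (pvDivisors dist).foldl (fun dd3 v => dd3.insert v (dd3.getD v 0 + 1)) dd2) _
      (fun dd2 dist _ => divisor_fold_eq dd2 dist)]
  cases ps with
  | nil => rfl
  | cons p0 rest =>
    simp only [List.drop_succ_cons, List.drop_zero, dl_cons_eq rest p0, pairfold_eq]

-- ===== VERDICT (by name: the statement is the Claim_ definition above) =====
theorem find_key_lengths_spec : Claim_equal_find_key_lengths := by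
  intro sequences _
  unfold Spec_find_key_lengths
  exact find_key_lengths_eq sequences
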